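-- pv_equiv track=rewrite | github.com/ramc004/Python_PyCharm_Github | Sixth_Form/Easter Term -Year 12/Board Games for Half Term Project /Snakes and Ladders/Snakes-and-Ladders-to_follow/snakes and ladders (very detailed)/gameplay 2.py | negative_easy_movement
-- ===== SOURCE A (Python) =====
-- easy_board_points = [(620, 580), (0, 0), (80, 0), (160, 0), (240, 0), (320, 0), (400, 0), (400, -80), (320, -80),
--                      (240, -80), (160, -80), (80, -80), (0, -80), (0, -160), (80, -160), (160, -160), (240, -160),
--                      (320, -160), (400, -160), (400, -240), (320, -240), (240, -240), (160, -240), (80, -240),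
--                      (0, -240), (0, -320), (80, -320), (160, -320), (240, -320), (320, -320), (400, -320), (400, -400),
--                      (320, -400), (240, -400), (160, -400), (80, -400), (0, -400)]
--
-- easy_board_rows = [[1, 2, 3, 4, 5, 6], [7, 8, 9, 10, 11, 12], [13, 14, 15, 16, 17, 18], [19, 20, 21, 22, 23, 24],
--                    [25, 26, 27, 28, 29, 30], [31, 32, 33, 34, 35, 36]]
--
-- def current_easy_box(x, y):
--     """Gets the coordinates of the beads on the easy board and returns the box number in which the bead is present.
--     Arguments
--     ---------
--     x : int
--         The x-coordinate of the bead.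
--     y : int
--         The y-coordinate of the bead.
--     Return
--     ------
--     box : int
--         The number of box in which the bead is present."""
--     box = 1
--     for i in easy_board_points:
--         if i[0] <= x < i[0] + 80 and i[1] <= y < i[1] + 80:
--             box = easy_board_points.index(i)
--             break
--     return box
--
-- def negative_easy_movement(x, y):
--     """Gets the coordinates of the beads on the easy board and changes them according to the row and column of the board
--     in which the bead is present. This function is only for the negative values of the token.
--         Arguments
--         ---------
--         x : int
--             The x-coordinate of the bead.
--         y : int
--             The y-coordinate of the bead.
--         Return
--         ------
--         x : int
--             The x-coordinate of the bead.
--         y : int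
--             The y-coordinate of the bead."""
--     row = 0
--     for i in easy_board_rows:
--         if current_easy_box(x, y) in i:
--             row = easy_board_rows.index(i)
--     if current_easy_box(x, y) in [7, 13, 19, 25, 31] and (x == 0 or x == 400):
--         y += 80
--     else:
--         if row % 2 == 0:
--             x -= 5
--         else:
--             x += 5
--     return x, y
-- ===== SOURCE B (Python) =====
-- def current_easy_box(x, y):
--     """Closed-form box lookup: the board is a 6x6 grid of 80px cells
--     (serpentine numbering 1..36), plus the off-board start point at (620, 580)
--     which is box 0; anywhere else the box defaults to 1."""
--     if 620 <= x < 700 and 580 <= y < 660: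
--         return 0
--     if 0 <= x < 480 and -400 <= y < 80:
--         c = x // 80
--         r = -(y // 80)
--         return r * 6 + (c + 1 if r % 2 == 0 else 6 - c)
--     return 1
--
--
-- def negative_easy_movement(x, y):
--     """Moves a bead backwards: arithmetic row derivation instead of scanning
--     the row table, with the box computed once."""
--     box = current_easy_box(x, y)
--     row = max(box - 1, 0) // 6
--     if box in (7, 13, 19, 25, 31) and (x == 0 or x == 400):
--         return x, y + 80
--     if row % 2 == 0:
--         return x - 5, y
--     return x + 5, y
-- ===== Notes on version B (the rewrite author's own statement) =====
-- stated objective: simpler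
-- what changed: Replaces both linear scans (the 37-point cell search with list.index, and the row-table scan over easy_board_rows) by closed-form grid arithmetic: box = serpentine formula from x//80 and y//80, row = max(box-1,0)//6.
import Mathlib
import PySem

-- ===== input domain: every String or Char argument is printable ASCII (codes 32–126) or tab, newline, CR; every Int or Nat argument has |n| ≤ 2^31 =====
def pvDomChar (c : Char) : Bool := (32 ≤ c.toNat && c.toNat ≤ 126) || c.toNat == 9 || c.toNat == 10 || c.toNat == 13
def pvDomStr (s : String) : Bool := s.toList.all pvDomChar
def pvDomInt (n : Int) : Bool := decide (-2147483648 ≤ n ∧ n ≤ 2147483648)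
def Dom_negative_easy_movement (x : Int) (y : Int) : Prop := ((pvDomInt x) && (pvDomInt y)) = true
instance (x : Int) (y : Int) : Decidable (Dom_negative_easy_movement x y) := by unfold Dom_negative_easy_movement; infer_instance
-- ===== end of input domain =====

-- B replaces A's linear scans over the board tables by closed-form grid arithmetic
-- (box and row computed directly from the coordinates); objective: simpler.

-- ===== PORT A =====
def easyBoardPoints : List (Int × Int) :=
  [((620 : Int), (580 : Int)),
   ((0 : Int), (0 : Int)),
   ((80 : Int), (0 : Int)),
   ((160 : Int), (0 : Int)),
   ((240 : Int), (0 : Int)),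
   ((320 : Int), (0 : Int)),
   ((400 : Int), (0 : Int)),
   ((400 : Int), (-80 : Int)),
   ((320 : Int), (-80 : Int)),
   ((240 : Int), (-80 : Int)),
   ((160 : Int), (-80 : Int)),
   ((80 : Int), (-80 : Int)),
   ((0 : Int), (-80 : Int)),
   ((0 : Int), (-160 : Int)),
   ((80 : Int), (-160 : Int)),
   ((160 : Int), (-160 : Int)),
   ((240 : Int), (-160 : Int)),
   ((320 : Int), (-160 : Int)),
   ((400 : Int), (-160 : Int)),
   ((400 : Int), (-240 : Int)),
   ((320 : Int), (-240 : Int)),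
   ((240 : Int), (-240 : Int)),
   ((160 : Int), (-240 : Int)),
   ((80 : Int), (-240 : Int)),
   ((0 : Int), (-240 : Int)),
   ((0 : Int), (-320 : Int)),
   ((80 : Int), (-320 : Int)),
   ((160 : Int), (-320 : Int)),
   ((240 : Int), (-320 : Int)),
   ((320 : Int), (-320 : Int)),
   ((400 : Int), (-320 : Int)),
   ((400 : Int), (-400 : Int)),
   ((320 : Int), (-400 : Int)),
   ((240 : Int), (-400 : Int)),
   ((160 : Int), (-400 : Int)),
   ((80 : Int), (-400 : Int)),
   ((0 : Int), (-400 : Int))]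

def easyBoardRows : List (List Int) :=
  [[(1 : Int), (2 : Int), (3 : Int), (4 : Int), (5 : Int), (6 : Int)],
   [(7 : Int), (8 : Int), (9 : Int), (10 : Int), (11 : Int), (12 : Int)],
   [(13 : Int), (14 : Int), (15 : Int), (16 : Int), (17 : Int), (18 : Int)],
   [(19 : Int), (20 : Int), (21 : Int), (22 : Int), (23 : Int), (24 : Int)],
   [(25 : Int), (26 : Int), (27 : Int), (28 : Int), (29 : Int), (30 : Int)],
   [(31 : Int), (32 : Int), (33 : Int), (34 : Int), (35 : Int), (36 : Int)]]

-- 'for i in easy_board_points: if i[0] <= x < i[0]+80 and i[1] <= y < i[1]+80: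
--      box = easy_board_points.index(i); break'  (box starts at 1)
def currentEasyBoxGo (x y : Int) : List (Int × Int) → Int → Int
  | [], box => box
  | i :: rest, box =>
    if i.1 ≤ x ∧ x < i.1 + 80 ∧ i.2 ≤ y ∧ y < i.2 + 80 then
      ((PySem.List.index? easyBoardPoints i).getD 0 : Int)
    else currentEasyBoxGo x y rest box

def current_easy_box (x y : Int) : Int := currentEasyBoxGo x y easyBoardPoints 1

def negative_easy_movement (x : Int) (y : Int) : Int × Int :=
  if current_easy_box x y ∈ ([7, 13, 19, 25, 31] : List Int) ∧ (x = 0 ∨ x = 400) then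
    (x, y + 80)
  else
    if PySem.Int.mod
        (easyBoardRows.foldl
          (fun row i => if current_easy_box x y ∈ i then ((PySem.List.index? easyBoardRows i).getD 0 : Int) else row) 0)
        2 = 0 then
      (x - 5, y)
    else (x + 5, y)

-- ===== PORT B =====
-- closed-form box (Source B's current_easy_box): the off-board start cell is box 0,
-- the 6×6 serpentine grid gives boxes 1..36, anywhere else defaults to 1
def current_easy_box_alt (x y : Int) : Int :=
  if 620 ≤ x ∧ x < 700 ∧ 580 ≤ y ∧ y < 660 then 0
  else if 0 ≤ x ∧ x < 480 ∧ -400 ≤ y ∧ y < 80 then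
    -(PySem.Int.floordiv y 80) * 6 +
      (if PySem.Int.mod (-(PySem.Int.floordiv y 80)) 2 = 0 then PySem.Int.floordiv x 80 + 1
       else 6 - PySem.Int.floordiv x 80)
  else 1

def negative_easy_movement_alt (x : Int) (y : Int) : Int × Int :=
  if current_easy_box_alt x y ∈ ([7, 13, 19, 25, 31] : List Int) ∧ (x = 0 ∨ x = 400) then
    (x, y + 80)
  else
    if PySem.Int.mod (PySem.Int.floordiv (max (current_easy_box_alt x y - 1) 0) 6) 2 = 0 then
      (x - 5, y)
    else (x + 5, y)

-- ===== PRECONDITION & SPEC =====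
def Spec_negative_easy_movement (x : Int) (y : Int) (out : Int × Int) : Prop := out = negative_easy_movement_alt x y
instance (x : Int) (y : Int) (out : Int × Int) : Decidable (Spec_negative_easy_movement x y out) := by unfold Spec_negative_easy_movement; infer_instance

-- ===== CLAIM (what is proved, stated in full; the proofs are below) =====
def Claim_equal_negative_easy_movement : Prop := ∀ (x : Int) (y : Int), Dom_negative_easy_movement x y → Spec_negative_easy_movement x y (negative_easy_movement x y)

-- ===== LEMMAS AND PROOFS =====

def pvTail37 : List (Int × Int) := []
def pvTail36 : List (Int × Int) := ((0 : Int), (-400 : Int)) :: pvTail37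
def pvTail35 : List (Int × Int) := ((80 : Int), (-400 : Int)) :: pvTail36
def pvTail34 : List (Int × Int) := ((160 : Int), (-400 : Int)) :: pvTail35
def pvTail33 : List (Int × Int) := ((240 : Int), (-400 : Int)) :: pvTail34
def pvTail32 : List (Int × Int) := ((320 : Int), (-400 : Int)) :: pvTail33
def pvTail31 : List (Int × Int) := ((400 : Int), (-400 : Int)) :: pvTail32
def pvTail30 : List (Int × Int) := ((400 : Int), (-320 : Int)) :: pvTail31
def pvTail29 : List (Int × Int) := ((320 : Int), (-320 : Int)) :: pvTail30
def pvTail28 : List (Int × Int) := ((240 : Int), (-320 : Int)) :: pvTail29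
def pvTail27 : List (Int × Int) := ((160 : Int), (-320 : Int)) :: pvTail28
def pvTail26 : List (Int × Int) := ((80 : Int), (-320 : Int)) :: pvTail27
def pvTail25 : List (Int × Int) := ((0 : Int), (-320 : Int)) :: pvTail26
def pvTail24 : List (Int × Int) := ((0 : Int), (-240 : Int)) :: pvTail25
def pvTail23 : List (Int × Int) := ((80 : Int), (-240 : Int)) :: pvTail24
def pvTail22 : List (Int × Int) := ((160 : Int), (-240 : Int)) :: pvTail23
def pvTail21 : List (Int × Int) := ((240 : Int), (-240 : Int)) :: pvTail22
def pvTail20 : List (Int × Int) := ((320 : Int), (-240 : Int)) :: pvTail21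
def pvTail19 : List (Int × Int) := ((400 : Int), (-240 : Int)) :: pvTail20
def pvTail18 : List (Int × Int) := ((400 : Int), (-160 : Int)) :: pvTail19
def pvTail17 : List (Int × Int) := ((320 : Int), (-160 : Int)) :: pvTail18
def pvTail16 : List (Int × Int) := ((240 : Int), (-160 : Int)) :: pvTail17
def pvTail15 : List (Int × Int) := ((160 : Int), (-160 : Int)) :: pvTail16
def pvTail14 : List (Int × Int) := ((80 : Int), (-160 : Int)) :: pvTail15
def pvTail13 : List (Int × Int) := ((0 : Int), (-160 : Int)) :: pvTail14
def pvTail12 : List (Int × Int) := ((0 : Int), (-80 : Int)) :: pvTail13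
def pvTail11 : List (Int × Int) := ((80 : Int), (-80 : Int)) :: pvTail12
def pvTail10 : List (Int × Int) := ((160 : Int), (-80 : Int)) :: pvTail11
def pvTail9 : List (Int × Int) := ((240 : Int), (-80 : Int)) :: pvTail10
def pvTail8 : List (Int × Int) := ((320 : Int), (-80 : Int)) :: pvTail9
def pvTail7 : List (Int × Int) := ((400 : Int), (-80 : Int)) :: pvTail8
def pvTail6 : List (Int × Int) := ((400 : Int), (0 : Int)) :: pvTail7
def pvTail5 : List (Int × Int) := ((320 : Int), (0 : Int)) :: pvTail6
def pvTail4 : List (Int × Int) := ((240 : Int), (0 : Int)) :: pvTail5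
def pvTail3 : List (Int × Int) := ((160 : Int), (0 : Int)) :: pvTail4
def pvTail2 : List (Int × Int) := ((80 : Int), (0 : Int)) :: pvTail3
def pvTail1 : List (Int × Int) := ((0 : Int), (0 : Int)) :: pvTail2
def pvTail0 : List (Int × Int) := ((620 : Int), (580 : Int)) :: pvTail1

theorem pvStep0 (x y box : Int) : currentEasyBoxGo x y pvTail0 box =
    if (620 : Int) ≤ x ∧ x < 620 + 80 ∧ (580 : Int) ≤ y ∧ y < 580 + 80 then (0 : Int)
    else currentEasyBoxGo x y pvTail1 box := by
  rw [show pvTail0 = ((620 : Int), (580 : Int)) :: pvTail1 from rfl]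
  simp only [currentEasyBoxGo]
  rw [show ((PySem.List.index? easyBoardPoints ((620 : Int), (580 : Int))).getD 0 : Int) = 0 from by decide]

theorem pvStep1 (x y box : Int) : currentEasyBoxGo x y pvTail1 box =
    if (0 : Int) ≤ x ∧ x < 0 + 80 ∧ (0 : Int) ≤ y ∧ y < 0 + 80 then (1 : Int)
    else currentEasyBoxGo x y pvTail2 box := by
  rw [show pvTail1 = ((0 : Int), (0 : Int)) :: pvTail2 from rfl]
  simp only [currentEasyBoxGo]
  rw [show ((PySem.List.index? easyBoardPoints ((0 : Int), (0 : Int))).getD 0 : Int) = 1 from by decide]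

theorem pvStep2 (x y box : Int) : currentEasyBoxGo x y pvTail2 box =
    if (80 : Int) ≤ x ∧ x < 80 + 80 ∧ (0 : Int) ≤ y ∧ y < 0 + 80 then (2 : Int)
    else currentEasyBoxGo x y pvTail3 box := by
  rw [show pvTail2 = ((80 : Int), (0 : Int)) :: pvTail3 from rfl]
  simp only [currentEasyBoxGo]
  rw [show ((PySem.List.index? easyBoardPoints ((80 : Int), (0 : Int))).getD 0 : Int) = 2 from by decide]

theorem pvStep3 (x y box : Int) : currentEasyBoxGo x y pvTail3 box =
    if (160 : Int) ≤ x ∧ x < 160 + 80 ∧ (0 : Int) ≤ y ∧ y < 0 + 80 then (3 : Int)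
    else currentEasyBoxGo x y pvTail4 box := by
  rw [show pvTail3 = ((160 : Int), (0 : Int)) :: pvTail4 from rfl]
  simp only [currentEasyBoxGo]
  rw [show ((PySem.List.index? easyBoardPoints ((160 : Int), (0 : Int))).getD 0 : Int) = 3 from by decide]

theorem pvStep4 (x y box : Int) : currentEasyBoxGo x y pvTail4 box =
    if (240 : Int) ≤ x ∧ x < 240 + 80 ∧ (0 : Int) ≤ y ∧ y < 0 + 80 then (4 : Int)
    else currentEasyBoxGo x y pvTail5 box := by
  rw [show pvTail4 = ((240 : Int), (0 : Int)) :: pvTail5 from rfl]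
  simp only [currentEasyBoxGo]
  rw [show ((PySem.List.index? easyBoardPoints ((240 : Int), (0 : Int))).getD 0 : Int) = 4 from by decide]

theorem pvStep5 (x y box : Int) : currentEasyBoxGo x y pvTail5 box =
    if (320 : Int) ≤ x ∧ x < 320 + 80 ∧ (0 : Int) ≤ y ∧ y < 0 + 80 then (5 : Int)
    else currentEasyBoxGo x y pvTail6 box := by
  rw [show pvTail5 = ((320 : Int), (0 : Int)) :: pvTail6 from rfl]
  simp only [currentEasyBoxGo]
  rw [show ((PySem.List.index? easyBoardPoints ((320 : Int), (0 : Int))).getD 0 : Int) = 5 from by decide]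

theorem pvStep6 (x y box : Int) : currentEasyBoxGo x y pvTail6 box =
    if (400 : Int) ≤ x ∧ x < 400 + 80 ∧ (0 : Int) ≤ y ∧ y < 0 + 80 then (6 : Int)
    else currentEasyBoxGo x y pvTail7 box := by
  rw [show pvTail6 = ((400 : Int), (0 : Int)) :: pvTail7 from rfl]
  simp only [currentEasyBoxGo]
  rw [show ((PySem.List.index? easyBoardPoints ((400 : Int), (0 : Int))).getD 0 : Int) = 6 from by decide]

theorem pvStep7 (x y box : Int) : currentEasyBoxGo x y pvTail7 box =
    if (400 : Int) ≤ x ∧ x < 400 + 80 ∧ (-80 : Int) ≤ y ∧ y < -80 + 80 then (7 : Int)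
    else currentEasyBoxGo x y pvTail8 box := by
  rw [show pvTail7 = ((400 : Int), (-80 : Int)) :: pvTail8 from rfl]
  simp only [currentEasyBoxGo]
  rw [show ((PySem.List.index? easyBoardPoints ((400 : Int), (-80 : Int))).getD 0 : Int) = 7 from by decide]

theorem pvStep8 (x y box : Int) : currentEasyBoxGo x y pvTail8 box =
    if (320 : Int) ≤ x ∧ x < 320 + 80 ∧ (-80 : Int) ≤ y ∧ y < -80 + 80 then (8 : Int)
    else currentEasyBoxGo x y pvTail9 box := by
  rw [show pvTail8 = ((320 : Int), (-80 : Int)) :: pvTail9 from rfl]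
  simp only [currentEasyBoxGo]
  rw [show ((PySem.List.index? easyBoardPoints ((320 : Int), (-80 : Int))).getD 0 : Int) = 8 from by decide]

theorem pvStep9 (x y box : Int) : currentEasyBoxGo x y pvTail9 box =
    if (240 : Int) ≤ x ∧ x < 240 + 80 ∧ (-80 : Int) ≤ y ∧ y < -80 + 80 then (9 : Int)
    else currentEasyBoxGo x y pvTail10 box := by
  rw [show pvTail9 = ((240 : Int), (-80 : Int)) :: pvTail10 from rfl]
  simp only [currentEasyBoxGo]
  rw [show ((PySem.List.index? easyBoardPoints ((240 : Int), (-80 : Int))).getD 0 : Int) = 9 from by decide]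

theorem pvStep10 (x y box : Int) : currentEasyBoxGo x y pvTail10 box =
    if (160 : Int) ≤ x ∧ x < 160 + 80 ∧ (-80 : Int) ≤ y ∧ y < -80 + 80 then (10 : Int)
    else currentEasyBoxGo x y pvTail11 box := by
  rw [show pvTail10 = ((160 : Int), (-80 : Int)) :: pvTail11 from rfl]
  simp only [currentEasyBoxGo]
  rw [show ((PySem.List.index? easyBoardPoints ((160 : Int), (-80 : Int))).getD 0 : Int) = 10 from by decide]

theorem pvStep11 (x y box : Int) : currentEasyBoxGo x y pvTail11 box =
    if (80 : Int) ≤ x ∧ x < 80 + 80 ∧ (-80 : Int) ≤ y ∧ y < -80 + 80 then (11 : Int)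
    else currentEasyBoxGo x y pvTail12 box := by
  rw [show pvTail11 = ((80 : Int), (-80 : Int)) :: pvTail12 from rfl]
  simp only [currentEasyBoxGo]
  rw [show ((PySem.List.index? easyBoardPoints ((80 : Int), (-80 : Int))).getD 0 : Int) = 11 from by decide]

theorem pvStep12 (x y box : Int) : currentEasyBoxGo x y pvTail12 box =
    if (0 : Int) ≤ x ∧ x < 0 + 80 ∧ (-80 : Int) ≤ y ∧ y < -80 + 80 then (12 : Int)
    else currentEasyBoxGo x y pvTail13 box := by
  rw [show pvTail12 = ((0 : Int), (-80 : Int)) :: pvTail13 from rfl]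
  simp only [currentEasyBoxGo]
  rw [show ((PySem.List.index? easyBoardPoints ((0 : Int), (-80 : Int))).getD 0 : Int) = 12 from by decide]

theorem pvStep13 (x y box : Int) : currentEasyBoxGo x y pvTail13 box =
    if (0 : Int) ≤ x ∧ x < 0 + 80 ∧ (-160 : Int) ≤ y ∧ y < -160 + 80 then (13 : Int)
    else currentEasyBoxGo x y pvTail14 box := by
  rw [show pvTail13 = ((0 : Int), (-160 : Int)) :: pvTail14 from rfl]
  simp only [currentEasyBoxGo]
  rw [show ((PySem.List.index? easyBoardPoints ((0 : Int), (-160 : Int))).getD 0 : Int) = 13 from by decide]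

theorem pvStep14 (x y box : Int) : currentEasyBoxGo x y pvTail14 box =
    if (80 : Int) ≤ x ∧ x < 80 + 80 ∧ (-160 : Int) ≤ y ∧ y < -160 + 80 then (14 : Int)
    else currentEasyBoxGo x y pvTail15 box := by
  rw [show pvTail14 = ((80 : Int), (-160 : Int)) :: pvTail15 from rfl]
  simp only [currentEasyBoxGo]
  rw [show ((PySem.List.index? easyBoardPoints ((80 : Int), (-160 : Int))).getD 0 : Int) = 14 from by decide]

theorem pvStep15 (x y box : Int) : currentEasyBoxGo x y pvTail15 box =
    if (160 : Int) ≤ x ∧ x < 160 + 80 ∧ (-160 : Int) ≤ y ∧ y < -160 + 80 then (15 : Int)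
    else currentEasyBoxGo x y pvTail16 box := by
  rw [show pvTail15 = ((160 : Int), (-160 : Int)) :: pvTail16 from rfl]
  simp only [currentEasyBoxGo]
  rw [show ((PySem.List.index? easyBoardPoints ((160 : Int), (-160 : Int))).getD 0 : Int) = 15 from by decide]

theorem pvStep16 (x y box : Int) : currentEasyBoxGo x y pvTail16 box =
    if (240 : Int) ≤ x ∧ x < 240 + 80 ∧ (-160 : Int) ≤ y ∧ y < -160 + 80 then (16 : Int)
    else currentEasyBoxGo x y pvTail17 box := by
  rw [show pvTail16 = ((240 : Int), (-160 : Int)) :: pvTail17 from rfl]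
  simp only [currentEasyBoxGo]
  rw [show ((PySem.List.index? easyBoardPoints ((240 : Int), (-160 : Int))).getD 0 : Int) = 16 from by decide]

theorem pvStep17 (x y box : Int) : currentEasyBoxGo x y pvTail17 box =
    if (320 : Int) ≤ x ∧ x < 320 + 80 ∧ (-160 : Int) ≤ y ∧ y < -160 + 80 then (17 : Int)
    else currentEasyBoxGo x y pvTail18 box := by
  rw [show pvTail17 = ((320 : Int), (-160 : Int)) :: pvTail18 from rfl]
  simp only [currentEasyBoxGo]
  rw [show ((PySem.List.index? easyBoardPoints ((320 : Int), (-160 : Int))).getD 0 : Int) = 17 from by decide]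

theorem pvStep18 (x y box : Int) : currentEasyBoxGo x y pvTail18 box =
    if (400 : Int) ≤ x ∧ x < 400 + 80 ∧ (-160 : Int) ≤ y ∧ y < -160 + 80 then (18 : Int)
    else currentEasyBoxGo x y pvTail19 box := by
  rw [show pvTail18 = ((400 : Int), (-160 : Int)) :: pvTail19 from rfl]
  simp only [currentEasyBoxGo]
  rw [show ((PySem.List.index? easyBoardPoints ((400 : Int), (-160 : Int))).getD 0 : Int) = 18 from by decide]

theorem pvStep19 (x y box : Int) : currentEasyBoxGo x y pvTail19 box =
    if (400 : Int) ≤ x ∧ x < 400 + 80 ∧ (-240 : Int) ≤ y ∧ y < -240 + 80 then (19 : Int)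
    else currentEasyBoxGo x y pvTail20 box := by
  rw [show pvTail19 = ((400 : Int), (-240 : Int)) :: pvTail20 from rfl]
  simp only [currentEasyBoxGo]
  rw [show ((PySem.List.index? easyBoardPoints ((400 : Int), (-240 : Int))).getD 0 : Int) = 19 from by decide]

theorem pvStep20 (x y box : Int) : currentEasyBoxGo x y pvTail20 box =
    if (320 : Int) ≤ x ∧ x < 320 + 80 ∧ (-240 : Int) ≤ y ∧ y < -240 + 80 then (20 : Int)
    else currentEasyBoxGo x y pvTail21 box := by
  rw [show pvTail20 = ((320 : Int), (-240 : Int)) :: pvTail21 from rfl]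
  simp only [currentEasyBoxGo]
  rw [show ((PySem.List.index? easyBoardPoints ((320 : Int), (-240 : Int))).getD 0 : Int) = 20 from by decide]

theorem pvStep21 (x y box : Int) : currentEasyBoxGo x y pvTail21 box =
    if (240 : Int) ≤ x ∧ x < 240 + 80 ∧ (-240 : Int) ≤ y ∧ y < -240 + 80 then (21 : Int)
    else currentEasyBoxGo x y pvTail22 box := by
  rw [show pvTail21 = ((240 : Int), (-240 : Int)) :: pvTail22 from rfl]
  simp only [currentEasyBoxGo]
  rw [show ((PySem.List.index? easyBoardPoints ((240 : Int), (-240 : Int))).getD 0 : Int) = 21 from by decide]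

theorem pvStep22 (x y box : Int) : currentEasyBoxGo x y pvTail22 box =
    if (160 : Int) ≤ x ∧ x < 160 + 80 ∧ (-240 : Int) ≤ y ∧ y < -240 + 80 then (22 : Int)
    else currentEasyBoxGo x y pvTail23 box := by
  rw [show pvTail22 = ((160 : Int), (-240 : Int)) :: pvTail23 from rfl]
  simp only [currentEasyBoxGo]
  rw [show ((PySem.List.index? easyBoardPoints ((160 : Int), (-240 : Int))).getD 0 : Int) = 22 from by decide]

theorem pvStep23 (x y box : Int) : currentEasyBoxGo x y pvTail23 box =
    if (80 : Int) ≤ x ∧ x < 80 + 80 ∧ (-240 : Int) ≤ y ∧ y < -240 + 80 then (23 : Int)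
    else currentEasyBoxGo x y pvTail24 box := by
  rw [show pvTail23 = ((80 : Int), (-240 : Int)) :: pvTail24 from rfl]
  simp only [currentEasyBoxGo]
  rw [show ((PySem.List.index? easyBoardPoints ((80 : Int), (-240 : Int))).getD 0 : Int) = 23 from by decide]

theorem pvStep24 (x y box : Int) : currentEasyBoxGo x y pvTail24 box =
    if (0 : Int) ≤ x ∧ x < 0 + 80 ∧ (-240 : Int) ≤ y ∧ y < -240 + 80 then (24 : Int)
    else currentEasyBoxGo x y pvTail25 box := by
  rw [show pvTail24 = ((0 : Int), (-240 : Int)) :: pvTail25 from rfl]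
  simp only [currentEasyBoxGo]
  rw [show ((PySem.List.index? easyBoardPoints ((0 : Int), (-240 : Int))).getD 0 : Int) = 24 from by decide]

theorem pvStep25 (x y box : Int) : currentEasyBoxGo x y pvTail25 box =
    if (0 : Int) ≤ x ∧ x < 0 + 80 ∧ (-320 : Int) ≤ y ∧ y < -320 + 80 then (25 : Int)
    else currentEasyBoxGo x y pvTail26 box := by
  rw [show pvTail25 = ((0 : Int), (-320 : Int)) :: pvTail26 from rfl]
  simp only [currentEasyBoxGo]
  rw [show ((PySem.List.index? easyBoardPoints ((0 : Int), (-320 : Int))).getD 0 : Int) = 25 from by decide]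

theorem pvStep26 (x y box : Int) : currentEasyBoxGo x y pvTail26 box =
    if (80 : Int) ≤ x ∧ x < 80 + 80 ∧ (-320 : Int) ≤ y ∧ y < -320 + 80 then (26 : Int)
    else currentEasyBoxGo x y pvTail27 box := by
  rw [show pvTail26 = ((80 : Int), (-320 : Int)) :: pvTail27 from rfl]
  simp only [currentEasyBoxGo]
  rw [show ((PySem.List.index? easyBoardPoints ((80 : Int), (-320 : Int))).getD 0 : Int) = 26 from by decide]

theorem pvStep27 (x y box : Int) : currentEasyBoxGo x y pvTail27 box =
    if (160 : Int) ≤ x ∧ x < 160 + 80 ∧ (-320 : Int) ≤ y ∧ y < -320 + 80 then (27 : Int)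
    else currentEasyBoxGo x y pvTail28 box := by
  rw [show pvTail27 = ((160 : Int), (-320 : Int)) :: pvTail28 from rfl]
  simp only [currentEasyBoxGo]
  rw [show ((PySem.List.index? easyBoardPoints ((160 : Int), (-320 : Int))).getD 0 : Int) = 27 from by decide]

theorem pvStep28 (x y box : Int) : currentEasyBoxGo x y pvTail28 box =
    if (240 : Int) ≤ x ∧ x < 240 + 80 ∧ (-320 : Int) ≤ y ∧ y < -320 + 80 then (28 : Int)
    else currentEasyBoxGo x y pvTail29 box := by
  rw [show pvTail28 = ((240 : Int), (-320 : Int)) :: pvTail29 from rfl]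
  simp only [currentEasyBoxGo]
  rw [show ((PySem.List.index? easyBoardPoints ((240 : Int), (-320 : Int))).getD 0 : Int) = 28 from by decide]

theorem pvStep29 (x y box : Int) : currentEasyBoxGo x y pvTail29 box =
    if (320 : Int) ≤ x ∧ x < 320 + 80 ∧ (-320 : Int) ≤ y ∧ y < -320 + 80 then (29 : Int)
    else currentEasyBoxGo x y pvTail30 box := by
  rw [show pvTail29 = ((320 : Int), (-320 : Int)) :: pvTail30 from rfl]
  simp only [currentEasyBoxGo]
  rw [show ((PySem.List.index? easyBoardPoints ((320 : Int), (-320 : Int))).getD 0 : Int) = 29 from by decide]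

theorem pvStep30 (x y box : Int) : currentEasyBoxGo x y pvTail30 box =
    if (400 : Int) ≤ x ∧ x < 400 + 80 ∧ (-320 : Int) ≤ y ∧ y < -320 + 80 then (30 : Int)
    else currentEasyBoxGo x y pvTail31 box := by
  rw [show pvTail30 = ((400 : Int), (-320 : Int)) :: pvTail31 from rfl]
  simp only [currentEasyBoxGo]
  rw [show ((PySem.List.index? easyBoardPoints ((400 : Int), (-320 : Int))).getD 0 : Int) = 30 from by decide]

theorem pvStep31 (x y box : Int) : currentEasyBoxGo x y pvTail31 box =
    if (400 : Int) ≤ x ∧ x < 400 + 80 ∧ (-400 : Int) ≤ y ∧ y < -400 + 80 then (31 : Int)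
    else currentEasyBoxGo x y pvTail32 box := by
  rw [show pvTail31 = ((400 : Int), (-400 : Int)) :: pvTail32 from rfl]
  simp only [currentEasyBoxGo]
  rw [show ((PySem.List.index? easyBoardPoints ((400 : Int), (-400 : Int))).getD 0 : Int) = 31 from by decide]

theorem pvStep32 (x y box : Int) : currentEasyBoxGo x y pvTail32 box =
    if (320 : Int) ≤ x ∧ x < 320 + 80 ∧ (-400 : Int) ≤ y ∧ y < -400 + 80 then (32 : Int)
    else currentEasyBoxGo x y pvTail33 box := by
  rw [show pvTail32 = ((320 : Int), (-400 : Int)) :: pvTail33 from rfl]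
  simp only [currentEasyBoxGo]
  rw [show ((PySem.List.index? easyBoardPoints ((320 : Int), (-400 : Int))).getD 0 : Int) = 32 from by decide]

theorem pvStep33 (x y box : Int) : currentEasyBoxGo x y pvTail33 box =
    if (240 : Int) ≤ x ∧ x < 240 + 80 ∧ (-400 : Int) ≤ y ∧ y < -400 + 80 then (33 : Int)
    else currentEasyBoxGo x y pvTail34 box := by
  rw [show pvTail33 = ((240 : Int), (-400 : Int)) :: pvTail34 from rfl]
  simp only [currentEasyBoxGo]
  rw [show ((PySem.List.index? easyBoardPoints ((240 : Int), (-400 : Int))).getD 0 : Int) = 33 from by decide]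

theorem pvStep34 (x y box : Int) : currentEasyBoxGo x y pvTail34 box =
    if (160 : Int) ≤ x ∧ x < 160 + 80 ∧ (-400 : Int) ≤ y ∧ y < -400 + 80 then (34 : Int)
    else currentEasyBoxGo x y pvTail35 box := by
  rw [show pvTail34 = ((160 : Int), (-400 : Int)) :: pvTail35 from rfl]
  simp only [currentEasyBoxGo]
  rw [show ((PySem.List.index? easyBoardPoints ((160 : Int), (-400 : Int))).getD 0 : Int) = 34 from by decide]

theorem pvStep35 (x y box : Int) : currentEasyBoxGo x y pvTail35 box =
    if (80 : Int) ≤ x ∧ x < 80 + 80 ∧ (-400 : Int) ≤ y ∧ y < -400 + 80 then (35 : Int)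
    else currentEasyBoxGo x y pvTail36 box := by
  rw [show pvTail35 = ((80 : Int), (-400 : Int)) :: pvTail36 from rfl]
  simp only [currentEasyBoxGo]
  rw [show ((PySem.List.index? easyBoardPoints ((80 : Int), (-400 : Int))).getD 0 : Int) = 35 from by decide]

theorem pvStep36 (x y box : Int) : currentEasyBoxGo x y pvTail36 box =
    if (0 : Int) ≤ x ∧ x < 0 + 80 ∧ (-400 : Int) ≤ y ∧ y < -400 + 80 then (36 : Int)
    else currentEasyBoxGo x y pvTail37 box := by
  rw [show pvTail36 = ((0 : Int), (-400 : Int)) :: pvTail37 from rfl]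
  simp only [currentEasyBoxGo]
  rw [show ((PySem.List.index? easyBoardPoints ((0 : Int), (-400 : Int))).getD 0 : Int) = 36 from by decide]

theorem pvGoNil (x y box : Int) : currentEasyBoxGo x y pvTail37 box = box := by
  rw [show pvTail37 = [] from rfl]
  simp only [currentEasyBoxGo]

set_option maxHeartbeats 2000000 in
theorem box_eq (x y : Int) : current_easy_box x y = current_easy_box_alt x y := by
  unfold current_easy_box current_easy_box_alt
  rw [show easyBoardPoints = pvTail0 from rfl]
  rw [pvStep0, pvStep1, pvStep2, pvStep3, pvStep4, pvStep5, pvStep6, pvStep7, pvStep8, pvStep9, pvStep10, pvStep11, pvStep12, pvStep13, pvStep14, pvStep15, pvStep16, pvStep17, pvStep18, pvStep19, pvStep20, pvStep21, pvStep22, pvStep23, pvStep24, pvStep25, pvStep26, pvStep27, pvStep28, pvStep29, pvStep30, pvStep31, pvStep32, pvStep33, pvStep34, pvStep35, pvStep36, pvGoNil]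
  rw [show PySem.Int.floordiv x 80 = x / 80 from PySem.Int.floordiv_eq_ediv_of_pos (by norm_num),
      show PySem.Int.floordiv y 80 = y / 80 from PySem.Int.floordiv_eq_ediv_of_pos (by norm_num),
      show PySem.Int.mod (-(y / 80)) 2 = (-(y / 80)) % 2 from PySem.Int.mod_eq_emod_of_pos (by norm_num)]
  by_cases h0 : (620 : Int) ≤ x ∧ x < 620 + 80 ∧ (580 : Int) ≤ y ∧ y < 580 + 80
  · rw [if_pos h0]; split_ifs <;> omega
  rw [if_neg h0]
  by_cases h1 : (0 : Int) ≤ x ∧ x < 0 + 80 ∧ (0 : Int) ≤ y ∧ y < 0 + 80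
  · rw [if_pos h1]; clear h0; split_ifs <;> omega
  rw [if_neg h1]
  by_cases h2 : (80 : Int) ≤ x ∧ x < 80 + 80 ∧ (0 : Int) ≤ y ∧ y < 0 + 80
  · rw [if_pos h2]; clear h0 h1; split_ifs <;> omega
  rw [if_neg h2]
  by_cases h3 : (160 : Int) ≤ x ∧ x < 160 + 80 ∧ (0 : Int) ≤ y ∧ y < 0 + 80
  · rw [if_pos h3]; clear h0 h1 h2; split_ifs <;> omega
  rw [if_neg h3]
  by_cases h4 : (240 : Int) ≤ x ∧ x < 240 + 80 ∧ (0 : Int) ≤ y ∧ y < 0 + 80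
  · rw [if_pos h4]; clear h0 h1 h2 h3; split_ifs <;> omega
  rw [if_neg h4]
  by_cases h5 : (320 : Int) ≤ x ∧ x < 320 + 80 ∧ (0 : Int) ≤ y ∧ y < 0 + 80
  · rw [if_pos h5]; clear h0 h1 h2 h3 h4; split_ifs <;> omega
  rw [if_neg h5]
  by_cases h6 : (400 : Int) ≤ x ∧ x < 400 + 80 ∧ (0 : Int) ≤ y ∧ y < 0 + 80
  · rw [if_pos h6]; clear h0 h1 h2 h3 h4 h5; split_ifs <;> omega
  rw [if_neg h6]
  by_cases h7 : (400 : Int) ≤ x ∧ x < 400 + 80 ∧ (-80 : Int) ≤ y ∧ y < -80 + 80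
  · rw [if_pos h7]; clear h0 h1 h2 h3 h4 h5 h6; split_ifs <;> omega
  rw [if_neg h7]
  by_cases h8 : (320 : Int) ≤ x ∧ x < 320 + 80 ∧ (-80 : Int) ≤ y ∧ y < -80 + 80
  · rw [if_pos h8]; clear h0 h1 h2 h3 h4 h5 h6 h7; split_ifs <;> omega
  rw [if_neg h8]
  by_cases h9 : (240 : Int) ≤ x ∧ x < 240 + 80 ∧ (-80 : Int) ≤ y ∧ y < -80 + 80
  · rw [if_pos h9]; clear h0 h1 h2 h3 h4 h5 h6 h7 h8; split_ifs <;> omega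
  rw [if_neg h9]
  by_cases h10 : (160 : Int) ≤ x ∧ x < 160 + 80 ∧ (-80 : Int) ≤ y ∧ y < -80 + 80
  · rw [if_pos h10]; clear h0 h1 h2 h3 h4 h5 h6 h7 h8 h9; split_ifs <;> omega
  rw [if_neg h10]
  by_cases h11 : (80 : Int) ≤ x ∧ x < 80 + 80 ∧ (-80 : Int) ≤ y ∧ y < -80 + 80
  · rw [if_pos h11]; clear h0 h1 h2 h3 h4 h5 h6 h7 h8 h9 h10; split_ifs <;> omega
  rw [if_neg h11]
  by_cases h12 : (0 : Int) ≤ x ∧ x < 0 + 80 ∧ (-80 : Int) ≤ y ∧ y < -80 + 80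
  · rw [if_pos h12]; clear h0 h1 h2 h3 h4 h5 h6 h7 h8 h9 h10 h11; split_ifs <;> omega
  rw [if_neg h12]
  by_cases h13 : (0 : Int) ≤ x ∧ x < 0 + 80 ∧ (-160 : Int) ≤ y ∧ y < -160 + 80
  · rw [if_pos h13]; clear h0 h1 h2 h3 h4 h5 h6 h7 h8 h9 h10 h11 h12; split_ifs <;> omega
  rw [if_neg h13]
  by_cases h14 : (80 : Int) ≤ x ∧ x < 80 + 80 ∧ (-160 : Int) ≤ y ∧ y < -160 + 80
  · rw [if_pos h14]; clear h0 h1 h2 h3 h4 h5 h6 h7 h8 h9 h10 h11 h12 h13; split_ifs <;> omega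
  rw [if_neg h14]
  by_cases h15 : (160 : Int) ≤ x ∧ x < 160 + 80 ∧ (-160 : Int) ≤ y ∧ y < -160 + 80
  · rw [if_pos h15]; clear h0 h1 h2 h3 h4 h5 h6 h7 h8 h9 h10 h11 h12 h13 h14; split_ifs <;> omega
  rw [if_neg h15]
  by_cases h16 : (240 : Int) ≤ x ∧ x < 240 + 80 ∧ (-160 : Int) ≤ y ∧ y < -160 + 80
  · rw [if_pos h16]; clear h0 h1 h2 h3 h4 h5 h6 h7 h8 h9 h10 h11 h12 h13 h14 h15; split_ifs <;> omega
  rw [if_neg h16]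
  by_cases h17 : (320 : Int) ≤ x ∧ x < 320 + 80 ∧ (-160 : Int) ≤ y ∧ y < -160 + 80
  · rw [if_pos h17]; clear h0 h1 h2 h3 h4 h5 h6 h7 h8 h9 h10 h11 h12 h13 h14 h15 h16; split_ifs <;> omega
  rw [if_neg h17]
  by_cases h18 : (400 : Int) ≤ x ∧ x < 400 + 80 ∧ (-160 : Int) ≤ y ∧ y < -160 + 80
  · rw [if_pos h18]; clear h0 h1 h2 h3 h4 h5 h6 h7 h8 h9 h10 h11 h12 h13 h14 h15 h16 h17; split_ifs <;> omega
  rw [if_neg h18]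
  by_cases h19 : (400 : Int) ≤ x ∧ x < 400 + 80 ∧ (-240 : Int) ≤ y ∧ y < -240 + 80
  · rw [if_pos h19]; clear h0 h1 h2 h3 h4 h5 h6 h7 h8 h9 h10 h11 h12 h13 h14 h15 h16 h17 h18; split_ifs <;> omega
  rw [if_neg h19]
  by_cases h20 : (320 : Int) ≤ x ∧ x < 320 + 80 ∧ (-240 : Int) ≤ y ∧ y < -240 + 80
  · rw [if_pos h20]; clear h0 h1 h2 h3 h4 h5 h6 h7 h8 h9 h10 h11 h12 h13 h14 h15 h16 h17 h18 h19; split_ifs <;> omega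
  rw [if_neg h20]
  by_cases h21 : (240 : Int) ≤ x ∧ x < 240 + 80 ∧ (-240 : Int) ≤ y ∧ y < -240 + 80
  · rw [if_pos h21]; clear h0 h1 h2 h3 h4 h5 h6 h7 h8 h9 h10 h11 h12 h13 h14 h15 h16 h17 h18 h19 h20; split_ifs <;> omega
  rw [if_neg h21]
  by_cases h22 : (160 : Int) ≤ x ∧ x < 160 + 80 ∧ (-240 : Int) ≤ y ∧ y < -240 + 80
  · rw [if_pos h22]; clear h0 h1 h2 h3 h4 h5 h6 h7 h8 h9 h10 h11 h12 h13 h14 h15 h16 h17 h18 h19 h20 h21; split_ifs <;> omega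
  rw [if_neg h22]
  by_cases h23 : (80 : Int) ≤ x ∧ x < 80 + 80 ∧ (-240 : Int) ≤ y ∧ y < -240 + 80
  · rw [if_pos h23]; clear h0 h1 h2 h3 h4 h5 h6 h7 h8 h9 h10 h11 h12 h13 h14 h15 h16 h17 h18 h19 h20 h21 h22; split_ifs <;> omega
  rw [if_neg h23]
  by_cases h24 : (0 : Int) ≤ x ∧ x < 0 + 80 ∧ (-240 : Int) ≤ y ∧ y < -240 + 80
  · rw [if_pos h24]; clear h0 h1 h2 h3 h4 h5 h6 h7 h8 h9 h10 h11 h12 h13 h14 h15 h16 h17 h18 h19 h20 h21 h22 h23; split_ifs <;> omega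
  rw [if_neg h24]
  by_cases h25 : (0 : Int) ≤ x ∧ x < 0 + 80 ∧ (-320 : Int) ≤ y ∧ y < -320 + 80
  · rw [if_pos h25]; clear h0 h1 h2 h3 h4 h5 h6 h7 h8 h9 h10 h11 h12 h13 h14 h15 h16 h17 h18 h19 h20 h21 h22 h23 h24; split_ifs <;> omega
  rw [if_neg h25]
  by_cases h26 : (80 : Int) ≤ x ∧ x < 80 + 80 ∧ (-320 : Int) ≤ y ∧ y < -320 + 80
  · rw [if_pos h26]; clear h0 h1 h2 h3 h4 h5 h6 h7 h8 h9 h10 h11 h12 h13 h14 h15 h16 h17 h18 h19 h20 h21 h22 h23 h24 h25; split_ifs <;> omega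
  rw [if_neg h26]
  by_cases h27 : (160 : Int) ≤ x ∧ x < 160 + 80 ∧ (-320 : Int) ≤ y ∧ y < -320 + 80
  · rw [if_pos h27]; clear h0 h1 h2 h3 h4 h5 h6 h7 h8 h9 h10 h11 h12 h13 h14 h15 h16 h17 h18 h19 h20 h21 h22 h23 h24 h25 h26; split_ifs <;> omega
  rw [if_neg h27]
  by_cases h28 : (240 : Int) ≤ x ∧ x < 240 + 80 ∧ (-320 : Int) ≤ y ∧ y < -320 + 80
  · rw [if_pos h28]; clear h0 h1 h2 h3 h4 h5 h6 h7 h8 h9 h10 h11 h12 h13 h14 h15 h16 h17 h18 h19 h20 h21 h22 h23 h24 h25 h26 h27; split_ifs <;> omega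
  rw [if_neg h28]
  by_cases h29 : (320 : Int) ≤ x ∧ x < 320 + 80 ∧ (-320 : Int) ≤ y ∧ y < -320 + 80
  · rw [if_pos h29]; clear h0 h1 h2 h3 h4 h5 h6 h7 h8 h9 h10 h11 h12 h13 h14 h15 h16 h17 h18 h19 h20 h21 h22 h23 h24 h25 h26 h27 h28; split_ifs <;> omega
  rw [if_neg h29]
  by_cases h30 : (400 : Int) ≤ x ∧ x < 400 + 80 ∧ (-320 : Int) ≤ y ∧ y < -320 + 80
  · rw [if_pos h30]; clear h0 h1 h2 h3 h4 h5 h6 h7 h8 h9 h10 h11 h12 h13 h14 h15 h16 h17 h18 h19 h20 h21 h22 h23 h24 h25 h26 h27 h28 h29; split_ifs <;> omega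
  rw [if_neg h30]
  by_cases h31 : (400 : Int) ≤ x ∧ x < 400 + 80 ∧ (-400 : Int) ≤ y ∧ y < -400 + 80
  · rw [if_pos h31]; clear h0 h1 h2 h3 h4 h5 h6 h7 h8 h9 h10 h11 h12 h13 h14 h15 h16 h17 h18 h19 h20 h21 h22 h23 h24 h25 h26 h27 h28 h29 h30; split_ifs <;> omega
  rw [if_neg h31]
  by_cases h32 : (320 : Int) ≤ x ∧ x < 320 + 80 ∧ (-400 : Int) ≤ y ∧ y < -400 + 80
  · rw [if_pos h32]; clear h0 h1 h2 h3 h4 h5 h6 h7 h8 h9 h10 h11 h12 h13 h14 h15 h16 h17 h18 h19 h20 h21 h22 h23 h24 h25 h26 h27 h28 h29 h30 h31; split_ifs <;> omega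
  rw [if_neg h32]
  by_cases h33 : (240 : Int) ≤ x ∧ x < 240 + 80 ∧ (-400 : Int) ≤ y ∧ y < -400 + 80
  · rw [if_pos h33]; clear h0 h1 h2 h3 h4 h5 h6 h7 h8 h9 h10 h11 h12 h13 h14 h15 h16 h17 h18 h19 h20 h21 h22 h23 h24 h25 h26 h27 h28 h29 h30 h31 h32; split_ifs <;> omega
  rw [if_neg h33]
  by_cases h34 : (160 : Int) ≤ x ∧ x < 160 + 80 ∧ (-400 : Int) ≤ y ∧ y < -400 + 80
  · rw [if_pos h34]; clear h0 h1 h2 h3 h4 h5 h6 h7 h8 h9 h10 h11 h12 h13 h14 h15 h16 h17 h18 h19 h20 h21 h22 h23 h24 h25 h26 h27 h28 h29 h30 h31 h32 h33; split_ifs <;> omega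
  rw [if_neg h34]
  by_cases h35 : (80 : Int) ≤ x ∧ x < 80 + 80 ∧ (-400 : Int) ≤ y ∧ y < -400 + 80
  · rw [if_pos h35]; clear h0 h1 h2 h3 h4 h5 h6 h7 h8 h9 h10 h11 h12 h13 h14 h15 h16 h17 h18 h19 h20 h21 h22 h23 h24 h25 h26 h27 h28 h29 h30 h31 h32 h33 h34; split_ifs <;> omega
  rw [if_neg h35]
  by_cases h36 : (0 : Int) ≤ x ∧ x < 0 + 80 ∧ (-400 : Int) ≤ y ∧ y < -400 + 80
  · rw [if_pos h36]; clear h0 h1 h2 h3 h4 h5 h6 h7 h8 h9 h10 h11 h12 h13 h14 h15 h16 h17 h18 h19 h20 h21 h22 h23 h24 h25 h26 h27 h28 h29 h30 h31 h32 h33 h34 h35; split_ifs <;> omega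
  rw [if_neg h36]
  have hS : ¬(620 ≤ x ∧ x < 700 ∧ 580 ≤ y ∧ y < 660) := fun hq => h0 ⟨by omega, by omega, by omega, by omega⟩
  rw [if_neg hS]
  by_cases hg : 0 ≤ x ∧ x < 480 ∧ -400 ≤ y ∧ y < 80
  · exfalso
    obtain ⟨hg1, hg2, hg3, hg4⟩ := hg
    obtain ⟨c, hc⟩ : ∃ c, c = x / 80 := ⟨_, rfl⟩
    obtain ⟨r, hr⟩ : ∃ r, r = -(y / 80) := ⟨_, rfl⟩
    have hcb : 0 ≤ c ∧ c ≤ 5 := by omega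
    have hrb : 0 ≤ r ∧ r ≤ 5 := by omega
    obtain ⟨hcb1, hcb2⟩ := hcb
    obtain ⟨hrb1, hrb2⟩ := hrb
    interval_cases c
    · interval_cases r
      · exact h1 ⟨by omega, by omega, by omega, by omega⟩
      · exact h12 ⟨by omega, by omega, by omega, by omega⟩
      · exact h13 ⟨by omega, by omega, by omega, by omega⟩
      · exact h24 ⟨by omega, by omega, by omega, by omega⟩
      · exact h25 ⟨by omega, by omega, by omega, by omega⟩
      · exact h36 ⟨by omega, by omega, by omega, by omega⟩
    · interval_cases r
      · exact h2 ⟨by omega, by omega, by omega, by omega⟩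
      · exact h11 ⟨by omega, by omega, by omega, by omega⟩
      · exact h14 ⟨by omega, by omega, by omega, by omega⟩
      · exact h23 ⟨by omega, by omega, by omega, by omega⟩
      · exact h26 ⟨by omega, by omega, by omega, by omega⟩
      · exact h35 ⟨by omega, by omega, by omega, by omega⟩
    · interval_cases r
      · exact h3 ⟨by omega, by omega, by omega, by omega⟩
      · exact h10 ⟨by omega, by omega, by omega, by omega⟩
      · exact h15 ⟨by omega, by omega, by omega, by omega⟩
      · exact h22 ⟨by omega, by omega, by omega, by omega⟩
      · exact h27 ⟨by omega, by omega, by omega, by omega⟩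
      · exact h34 ⟨by omega, by omega, by omega, by omega⟩
    · interval_cases r
      · exact h4 ⟨by omega, by omega, by omega, by omega⟩
      · exact h9 ⟨by omega, by omega, by omega, by omega⟩
      · exact h16 ⟨by omega, by omega, by omega, by omega⟩
      · exact h21 ⟨by omega, by omega, by omega, by omega⟩
      · exact h28 ⟨by omega, by omega, by omega, by omega⟩
      · exact h33 ⟨by omega, by omega, by omega, by omega⟩
    · interval_cases r
      · exact h5 ⟨by omega, by omega, by omega, by omega⟩
      · exact h8 ⟨by omega, by omega, by omega, by omega⟩
      · exact h17 ⟨by omega, by omega, by omega, by omega⟩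
      · exact h20 ⟨by omega, by omega, by omega, by omega⟩
      · exact h29 ⟨by omega, by omega, by omega, by omega⟩
      · exact h32 ⟨by omega, by omega, by omega, by omega⟩
    · interval_cases r
      · exact h6 ⟨by omega, by omega, by omega, by omega⟩
      · exact h7 ⟨by omega, by omega, by omega, by omega⟩
      · exact h18 ⟨by omega, by omega, by omega, by omega⟩
      · exact h19 ⟨by omega, by omega, by omega, by omega⟩
      · exact h30 ⟨by omega, by omega, by omega, by omega⟩
      · exact h31 ⟨by omega, by omega, by omega, by omega⟩
  rw [if_neg hg]

theorem box_range (x y : Int) : 0 ≤ current_easy_box_alt x y ∧ current_easy_box_alt x y ≤ 36 := by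
  unfold current_easy_box_alt
  rw [show PySem.Int.floordiv x 80 = x / 80 from PySem.Int.floordiv_eq_ediv_of_pos (by norm_num),
      show PySem.Int.floordiv y 80 = y / 80 from PySem.Int.floordiv_eq_ediv_of_pos (by norm_num),
      show PySem.Int.mod (-(y / 80)) 2 = (-(y / 80)) % 2 from PySem.Int.mod_eq_emod_of_pos (by norm_num)]
  split_ifs <;> omega

theorem row_eq (b : Int) (hb : 0 ≤ b ∧ b ≤ 36) :
    easyBoardRows.foldl
      (fun row i => if b ∈ i then ((PySem.List.index? easyBoardRows i).getD 0 : Int) else row) 0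
      = PySem.Int.floordiv (max (b - 1) 0) 6 := by
  rw [show PySem.Int.floordiv (max (b - 1) 0) 6 = (max (b - 1) 0) / 6 from
        PySem.Int.floordiv_eq_ediv_of_pos (by norm_num)]
  have r0 : ((PySem.List.index? easyBoardRows [1,2,3,4,5,6]).getD 0 : Int) = 0 := by decide
  have r1 : ((PySem.List.index? easyBoardRows [7,8,9,10,11,12]).getD 0 : Int) = 1 := by decide
  have r2 : ((PySem.List.index? easyBoardRows [13,14,15,16,17,18]).getD 0 : Int) = 2 := by decide
  have r3 : ((PySem.List.index? easyBoardRows [19,20,21,22,23,24]).getD 0 : Int) = 3 := by decide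
  have r4 : ((PySem.List.index? easyBoardRows [25,26,27,28,29,30]).getD 0 : Int) = 4 := by decide
  have r5 : ((PySem.List.index? easyBoardRows [31,32,33,34,35,36]).getD 0 : Int) = 5 := by decide
  rw [show easyBoardRows.foldl
      (fun row i => if b ∈ i then ((PySem.List.index? easyBoardRows i).getD 0 : Int) else row) 0 =
      (if b ∈ ([31,32,33,34,35,36]:List Int) then ((PySem.List.index? easyBoardRows [31,32,33,34,35,36]).getD 0 : Int) else
       if b ∈ ([25,26,27,28,29,30]:List Int) then ((PySem.List.index? easyBoardRows [25,26,27,28,29,30]).getD 0 : Int) else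
       if b ∈ ([19,20,21,22,23,24]:List Int) then ((PySem.List.index? easyBoardRows [19,20,21,22,23,24]).getD 0 : Int) else
       if b ∈ ([13,14,15,16,17,18]:List Int) then ((PySem.List.index? easyBoardRows [13,14,15,16,17,18]).getD 0 : Int) else
       if b ∈ ([7,8,9,10,11,12]:List Int) then ((PySem.List.index? easyBoardRows [7,8,9,10,11,12]).getD 0 : Int) else
       if b ∈ ([1,2,3,4,5,6]:List Int) then ((PySem.List.index? easyBoardRows [1,2,3,4,5,6]).getD 0 : Int) else 0)
      from by simp [easyBoardRows, List.foldl]]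
  rw [r0, r1, r2, r3, r4, r5, max_def]
  simp only [List.mem_cons, List.not_mem_nil, or_false]
  split_ifs <;> omega

-- ===== VERDICT (by name: the statement is the Claim_ definition above) =====
theorem negative_easy_movement_spec : Claim_equal_negative_easy_movement := by
  intro x y _
  unfold Spec_negative_easy_movement negative_easy_movement negative_easy_movement_alt
  rw [box_eq]
  rw [row_eq (current_easy_box_alt x y) (box_range x y)]
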